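-- pv_equiv track=rewrite | github.com/tlandenberger/nussinov | nussinov.py | createDotBracket
-- ===== SOURCE A (Python) =====
-- def createDotBracket(seq, bp, maxScore):
--     out = "\n"
--     out += seq + "\n"
--
--     for i in range(0, len(seq)):
--         tpl = [(x, y) for x, y in bp if x == i + 1]
--         tpl2 = [(x, y) for x, y in bp if y == i + 1]
--         if tpl:
--             out += "("
--         elif tpl2:
--             out += ")"
--         else:
--             out += "."
--
--     return out
-- ===== SOURCE B (Python) =====
-- def createDotBracket(seq, bp, maxScore):
--     n = len(seq)
--     chars = ["."] * n
--     for x, y in bp: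
--         if 1 <= y <= n:
--             chars[y - 1] = ")"
--     for x, y in bp:
--         if 1 <= x <= n:
--             chars[x - 1] = "("
--     return "\n" + seq + "\n" + "".join(chars)
-- ===== Notes on version B (the rewrite author's own statement) =====
-- stated objective: faster
-- what changed: Instead of scanning the whole pair list twice for every sequence position (building two filtered lists per position), B allocates a '.'-buffer once and makes two passes over the pair list, writing ')' then '(' into the buffer (openings overwrite, matching A's opening-first priority; out-of-range indices are skipped as A's position scan never reaches them).
import Mathlib
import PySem

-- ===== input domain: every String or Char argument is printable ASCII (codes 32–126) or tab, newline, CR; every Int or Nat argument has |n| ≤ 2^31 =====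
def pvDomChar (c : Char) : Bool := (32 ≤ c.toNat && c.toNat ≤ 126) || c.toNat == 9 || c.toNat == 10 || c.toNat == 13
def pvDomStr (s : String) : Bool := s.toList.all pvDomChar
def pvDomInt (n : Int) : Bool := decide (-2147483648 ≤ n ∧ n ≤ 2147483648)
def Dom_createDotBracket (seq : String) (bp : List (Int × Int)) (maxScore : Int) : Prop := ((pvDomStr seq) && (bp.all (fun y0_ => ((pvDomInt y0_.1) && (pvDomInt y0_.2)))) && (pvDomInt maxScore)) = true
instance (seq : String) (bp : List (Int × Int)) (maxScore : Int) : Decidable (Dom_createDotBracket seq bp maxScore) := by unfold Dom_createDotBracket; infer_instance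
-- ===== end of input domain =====

-- B replaces A's per-position double scan of bp by a single '.'-buffer and two passes
-- over bp (')' then '(' so openings overwrite), for O(n+m) instead of O(n*m) work.

-- ===== PORT A =====
def createDotBracket (seq : String) (bp : List (Int × Int)) (maxScore : Int) : String :=
  let out := "\n" ++ seq ++ "\n"
  (List.range seq.toList.length).foldl (fun (out : String) (i : Nat) =>
    let tpl := bp.filter (fun p => p.1 == (i : Int) + 1)
    let tpl2 := bp.filter (fun p => p.2 == (i : Int) + 1)
    if tpl ≠ [] then out ++ "("
    else if tpl2 ≠ [] then out ++ ")"
    else out ++ ".") out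

-- ===== PORT B =====
def createDotBracket_alt (seq : String) (bp : List (Int × Int)) (maxScore : Int) : String :=
  let n := seq.toList.length
  let chars := List.replicate n '.'
  let chars := bp.foldl (fun (cs : List Char) p =>
    if 1 ≤ p.2 ∧ p.2 ≤ (n : Int) then cs.set (p.2 - 1).toNat ')' else cs) chars
  let chars := bp.foldl (fun (cs : List Char) p =>
    if 1 ≤ p.1 ∧ p.1 ≤ (n : Int) then cs.set (p.1 - 1).toNat '(' else cs) chars
  "\n" ++ seq ++ "\n" ++ String.ofList chars

-- ===== PRECONDITION & SPEC =====
def Spec_createDotBracket (seq : String) (bp : List (Int × Int)) (maxScore : Int) (out : String) : Prop := out = createDotBracket_alt seq bp maxScore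
instance (seq : String) (bp : List (Int × Int)) (maxScore : Int) (out : String) : Decidable (Spec_createDotBracket seq bp maxScore out) := by unfold Spec_createDotBracket; infer_instance

-- ===== CLAIM (what is proved, stated in full; the proofs are below) =====
def Claim_equal_createDotBracket : Prop := ∀ (seq : String) (bp : List (Int × Int)) (maxScore : Int), Dom_createDotBracket seq bp maxScore → Spec_createDotBracket seq bp maxScore (createDotBracket seq bp maxScore)

-- ===== LEMMAS AND PROOFS =====

-- the character A emits at position i
def pvChar (bp : List (Int × Int)) (i : Nat) : Char :=
  if bp.any (fun p => p.1 == (i : Int) + 1) then '('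
  else if bp.any (fun p => p.2 == (i : Int) + 1) then ')'
  else '.'

lemma filter_nil_iff_any_false {α : Type} (p : α → Bool) (l : List α) :
    (l.filter p = []) ↔ (l.any p = false) := by
  rw [List.filter_eq_nil_iff, List.any_eq_false]

lemma a_step (bp : List (Int × Int)) (init : String) (a : Nat) :
    (let tpl := bp.filter (fun p => p.1 == (a : Int) + 1)
     let tpl2 := bp.filter (fun p => p.2 == (a : Int) + 1)
     if tpl ≠ [] then init ++ "("
     else if tpl2 ≠ [] then init ++ ")"
     else init ++ ".") = init ++ String.ofList [pvChar bp a] := by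
  simp only [pvChar, ne_eq, filter_nil_iff_any_false]
  by_cases h1 : bp.any (fun p => p.1 == (a : Int) + 1)
  · simp [h1]
  · by_cases h2 : bp.any (fun p => p.2 == (a : Int) + 1)
    · simp [h1, h2]
    · simp [h1, h2]

lemma a_fold (bp : List (Int × Int)) :
    ∀ (l : List Nat) (init : String),
      l.foldl (fun (out : String) (i : Nat) =>
        let tpl := bp.filter (fun p => p.1 == (i : Int) + 1)
        let tpl2 := bp.filter (fun p => p.2 == (i : Int) + 1)
        if tpl ≠ [] then out ++ "("
        else if tpl2 ≠ [] then out ++ ")"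
        else out ++ ".") init = init ++ String.ofList (l.map (pvChar bp)) := by
  intro l
  induction l with
  | nil => intro init; apply String.ext; simp
  | cons a l ih =>
    intro init
    rw [List.foldl_cons, a_step, ih]
    apply String.ext
    simp

lemma set_fold_len (sel : Int × Int → Int) (ch : Char) (n : Nat) :
    ∀ (bp : List (Int × Int)) (cs : List Char),
      (bp.foldl (fun (cs : List Char) p =>
        if 1 ≤ sel p ∧ sel p ≤ (n : Int) then cs.set (sel p - 1).toNat ch else cs) cs).length
      = cs.length := by
  intro bp
  induction bp with
  | nil => intro cs; rfl
  | cons q bp ih =>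
    intro cs
    rw [List.foldl_cons]
    by_cases hq : 1 ≤ sel q ∧ sel q ≤ (n : Int)
    · rw [if_pos hq, ih]; simp
    · rw [if_neg hq, ih]

lemma set_fold_get? (sel : Int × Int → Int) (ch : Char) (n : Nat) :
    ∀ (bp : List (Int × Int)) (cs : List Char), cs.length = n → ∀ i, i < n →
      (bp.foldl (fun (cs : List Char) p =>
        if 1 ≤ sel p ∧ sel p ≤ (n : Int) then cs.set (sel p - 1).toNat ch else cs) cs)[i]?
      = if bp.any (fun p => sel p == (i : Int) + 1) then some ch else cs[i]? := by
  intro bp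
  induction bp with
  | nil => intro cs hcs i hi; simp
  | cons q bp ih =>
    intro cs hcs i hi
    rw [List.foldl_cons]
    by_cases hq : 1 ≤ sel q ∧ sel q ≤ (n : Int)
    · rw [if_pos hq, ih _ (by simpa using hcs) i hi]
      by_cases hrest : bp.any (fun p => sel p == (i : Int) + 1)
      · simp [hrest]
      · simp only [hrest, List.any_cons, Bool.or_eq_true]
        rw [List.getElem?_set]
        by_cases heq : sel q == (i : Int) + 1
        · have hidx : (sel q - 1).toNat = i := by
            have := beq_iff_eq.mp heq; omega
          simp [hidx, heq, hcs, hi]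
        · have hidx : (sel q - 1).toNat ≠ i := by
            intro habs
            apply heq
            have h1 : (1 : Int) ≤ sel q := hq.1
            rw [beq_iff_eq]; omega
          rw [if_neg hidx]
          simp [heq]
    · rw [if_neg hq, ih cs hcs i hi]
      have hqne : (sel q == (i : Int) + 1) = false := by
        rw [beq_eq_false_iff_ne]
        intro habs
        apply hq
        constructor <;> omega
      rw [List.any_cons, hqne, Bool.false_or]

-- ===== VERDICT (by name: the statement is the Claim_ definition above) =====
theorem createDotBracket_spec : Claim_equal_createDotBracket := by
  intro seq bp maxScore _
  unfold Spec_createDotBracket createDotBracket createDotBracket_alt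
  rw [a_fold]
  congr 1
  apply congrArg
  -- list-level equality
  set n := seq.toList.length with hn
  set cs1 := bp.foldl (fun (cs : List Char) p =>
    if 1 ≤ p.2 ∧ p.2 ≤ (n : Int) then cs.set (p.2 - 1).toNat ')' else cs) (List.replicate n '.') with hcs1
  have hl1 : cs1.length = n := by
    rw [hcs1, set_fold_len]; simp
  have hl2 : (bp.foldl (fun (cs : List Char) p =>
      if 1 ≤ p.1 ∧ p.1 ≤ (n : Int) then cs.set (p.1 - 1).toNat '(' else cs) cs1).length = n := by
    rw [set_fold_len]; exact hl1
  apply List.ext_getElem?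
  intro i
  by_cases hi : i < n
  · rw [set_fold_get? (fun p => p.1) '(' n bp cs1 hl1 i hi, List.getElem?_map]
    rw [hcs1, set_fold_get? (fun p => p.2) ')' n bp (List.replicate n '.') (by simp) i hi]
    simp [pvChar, hi]
    by_cases h1 : bp.any (fun p => p.1 == (i : Int) + 1)
    · simp [h1]
    · by_cases h2 : bp.any (fun p => p.2 == (i : Int) + 1) <;> simp [h1, h2]
  · have h1 : ((List.range n).map (pvChar bp))[i]? = none := by
      rw [List.getElem?_eq_none_iff]; simpa using Nat.le_of_not_lt hi
    have h2 : (bp.foldl (fun (cs : List Char) p =>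
        if 1 ≤ p.1 ∧ p.1 ≤ (n : Int) then cs.set (p.1 - 1).toNat '(' else cs) cs1)[i]? = none := by
      rw [List.getElem?_eq_none_iff, hl2]; exact Nat.le_of_not_lt hi
    rw [h1, h2]
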